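-- pv_equiv track=rewrite | github.com/dudejrs/coding-practice | python/cote/PGMRS/순위_검색.py | makeScoresMap
-- ===== SOURCE A (Python) =====
-- from collections import OrderedDict
--
-- def forEachKey(index, prefix, tokens, action) :
-- 	if index == len(tokens)-1 :
-- 		action(prefix)
-- 		return
--
-- 	forEachKey(index+1, prefix+tokens[index], tokens, action)
-- 	forEachKey(index+1, prefix+"-", tokens, action)
--
-- def addScoresMap(scoresMap, prefix, score) :
--
-- 	if scoresMap.get(prefix) is None :
-- 		scoresMap[prefix] = []
-- 	scoresMap.get(prefix).append(score)
--
-- 	return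
--
-- def makeScoresMap(info) :
-- 	scoresMap = OrderedDict()
--
-- 	for tmp in info :
-- 		tokens = tmp.split(" ")
-- 		forEachKey(0, "", tokens, lambda p : addScoresMap(scoresMap, p, tokens[-1]) )
--
-- 	for key in scoresMap.keys() :
-- 		scoresMap.get(key).sort()
--
-- 	return scoresMap
-- ===== SOURCE B (Python) =====
-- from collections import OrderedDict
--
-- def makeScoresMap(info):
--     scoresMap = OrderedDict()
--     for tmp in info:
--         tokens = tmp.split(" ")
--         score = tokens[-1]
--         keys = [""]
--         for tok in tokens[:-1]:
--             keys = [p + t for p in keys for t in (tok, "-")]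
--         for key in keys:
--             scoresMap.setdefault(key, []).append(score)
--     for key in scoresMap:
--         scoresMap[key].sort()
--     return scoresMap
-- ===== Notes on version B (the rewrite author's own statement) =====
-- stated objective: alternative
-- what changed: Replaces A's recursive callback-driven DFS (forEachKey with an action lambda mutating the map) by an iterative layered-product: for each info string the 2^(k) wildcard keys are built directly as a list by folding over tokens[:-1], then appended into the map with setdefault; the final per-key sort loop is unchanged.
import Mathlib
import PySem

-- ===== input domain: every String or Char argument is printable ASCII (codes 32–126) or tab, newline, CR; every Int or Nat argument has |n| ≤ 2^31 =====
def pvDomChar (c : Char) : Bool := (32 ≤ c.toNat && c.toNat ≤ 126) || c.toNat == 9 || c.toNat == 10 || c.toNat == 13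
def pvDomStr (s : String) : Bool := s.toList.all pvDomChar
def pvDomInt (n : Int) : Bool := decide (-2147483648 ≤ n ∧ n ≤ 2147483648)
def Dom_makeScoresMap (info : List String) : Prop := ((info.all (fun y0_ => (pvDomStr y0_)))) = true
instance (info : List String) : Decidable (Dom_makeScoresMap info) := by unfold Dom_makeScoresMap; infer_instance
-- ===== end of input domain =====

-- B replaces A's recursive callback-driven DFS over key patterns by an iterative layered
-- product building the key list directly (objective: alternative decomposition, same cost).

-- ===== PORT A =====
-- addScoresMap(scoresMap, prefix, score)
def addScoresMapA (d : PySem.Dict String (List String)) (prefix_ score : String) :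
    PySem.Dict String (List String) :=
  let d := if (d.get? prefix_).isNone then d.insert prefix_ [] else d
  d.modify prefix_ [] (fun v => v ++ [score])  -- scoresMap.get(prefix).append(score); key present

-- forEachKey(index, prefix, tokens, action) with the concrete action (append tokens[-1]) inlined
-- and the mutated dict threaded as state; fuel only makes the recursion total — every call made
-- by makeScoresMap has fuel ≥ tokens.length - index, so the 0 branch is never reached.
def forEachKeyA (fuel index : Nat) (prefix_ : String) (tokens : List String) (score : String)
    (d : PySem.Dict String (List String)) : PySem.Dict String (List String) :=
  match fuel with
  | 0 => d
  | fuel + 1 =>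
    if index = tokens.length - 1 then
      addScoresMapA d prefix_ score
    else
      let d1 := forEachKeyA fuel (index + 1)
        (prefix_ ++ PySem.List.pyGetD tokens (index : Int) "") tokens score d
      forEachKeyA fuel (index + 1) (prefix_ ++ "-") tokens score d1

def makeScoresMap (info : List String) : List (String × List String) :=
  let d := info.foldl (fun scoresMap tmp =>
      let tokens := (PySem.Str.split? tmp " ").getD []   -- tmp.split(" "): sep ≠ "", never none
      -- tokens[-1]: tokens is never empty, so pyGet? is never none
      forEachKeyA tokens.length 0 "" tokens ((PySem.List.pyGet? tokens (-1)).getD "") scoresMap)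
    PySem.Dict.empty
  let d := d.keys.foldl (fun m k => m.modify k [] (fun v => PySem.List.sorted v (fun x => x))) d
  d.items

-- ===== PORT B =====
def makeScoresMap_alt (info : List String) : List (String × List String) :=
  let d := info.foldl (fun scoresMap tmp =>
      let tokens := (PySem.Str.split? tmp " ").getD []   -- tmp.split(" "): sep ≠ "", never none
      let score := (PySem.List.pyGet? tokens (-1)).getD ""   -- tokens[-1], tokens never empty
      -- keys = [""]; for tok in tokens[:-1]: keys = [p + t for p in keys for t in (tok, "-")]
      let keys := tokens.dropLast.foldl
        (fun acc tok => acc.flatMap (fun p => [p ++ tok, p ++ "-"])) [""]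
      keys.foldl (fun m key => (m.setdefault key []).modify key [] (fun v => v ++ [score]))
        scoresMap)
    PySem.Dict.empty
  let d := d.keys.foldl (fun m k => m.modify k [] (fun v => PySem.List.sorted v (fun x => x))) d
  d.items

-- ===== PRECONDITION & SPEC =====
def Spec_makeScoresMap (info : List String) (out : List (String × List String)) : Prop := out = makeScoresMap_alt info
instance (info : List String) (out : List (String × List String)) : Decidable (Spec_makeScoresMap info out) := by unfold Spec_makeScoresMap; infer_instance

-- ===== CLAIM (what is proved, stated in full; the proofs are below) =====
def Claim_equal_makeScoresMap : Prop := ∀ (info : List String), Dom_makeScoresMap info → Spec_makeScoresMap info (makeScoresMap info)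

-- ===== LEMMAS AND PROOFS =====

-- s.split(" ") is never the empty list
lemma splitOn_go_ne_nil (sep : List Char) :
    ∀ (fuel : Nat) (l cur : List Char) (acc : List (List Char)),
      PySem.Chars.splitOn.go sep fuel l cur acc ≠ [] := by
  intro fuel
  induction fuel with
  | zero => intro l cur acc; simp [PySem.Chars.splitOn.go]
  | succ n ih =>
    intro l cur acc
    cases l with
    | nil => simp [PySem.Chars.splitOn.go]
    | cons c rest =>
      rw [PySem.Chars.splitOn.go]
      split
      · exact ih _ _ _
      · exact ih _ _ _

lemma tokens_ne_nil (s : String) : (PySem.Str.split? s " ").getD [] ≠ [] := by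
  intro hnil
  have hb := PySem.Str.split?_map s " "
  have hch : PySem.Chars.split? s.toList " ".toList
      = some (PySem.Chars.splitOn s.toList " ".toList) := by
    simp [PySem.Chars.split?]
  rw [hch] at hb
  cases h : PySem.Str.split? s " " with
  | none => rw [h] at hb; simp at hb
  | some l =>
    rw [h] at hb hnil
    simp only [Option.getD_some] at hnil
    subst hnil
    simp only [Option.map_some, Option.some.injEq, List.map_nil] at hb
    exact splitOn_go_ne_nil _ _ _ _ _ hb.symm

-- the DFS key order, named: actual token first, then "-", leftmost position outermost
def prodKeys : List String → String → List String
  | [], p => [p]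
  | t :: ts, p => prodKeys ts (p ++ t) ++ prodKeys ts (p ++ "-")

-- B's per-key update is A's addScoresMap
lemma addB_eq_addA (m : PySem.Dict String (List String)) (k s : String) :
    (m.setdefault k []).modify k [] (fun v => v ++ [s]) = addScoresMapA m k s := by
  unfold addScoresMapA PySem.Dict.setdefault
  by_cases h : m.contains k = true
  · have hg : (m.get? k).isNone = false := by
      cases hv : m.get? k with
      | none =>
        rw [(PySem.Dict.get?_eq_none_iff_contains m k).mp hv] at h
        simp at h
      | some v => simp
    simp [h, hg]
  · have hc : m.contains k = false := by simpa using h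
    have hg : (m.get? k).isNone = true := by
      rw [Option.isNone_iff_eq_none, PySem.Dict.get?_eq_none_iff_contains, hc]
    simp [hc, hg, PySem.Dict.insert]

-- A's recursive DFS is the fold of addScoresMap over prodKeys of the middle tokens
lemma forEachKeyA_eq (score : String) :
    ∀ (fuel : Nat) (tokens : List String) (idx : Nat) (p : String)
      (d : PySem.Dict String (List String)),
      idx < tokens.length → tokens.length ≤ idx + fuel →
      forEachKeyA fuel idx p tokens score d
        = (prodKeys ((tokens.drop idx).dropLast) p).foldl
            (fun m k => addScoresMapA m k score) d := by
  intro fuel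
  induction fuel with
  | zero => intro tokens idx p d h1 h2; omega
  | succ n ih =>
    intro tokens idx p d h1 h2
    rw [forEachKeyA]
    by_cases h : idx = tokens.length - 1
    · subst h
      obtain ⟨a, ha⟩ := List.length_eq_one_iff.mp
        (show (tokens.drop (tokens.length - 1)).length = 1 by
          simp only [List.length_drop]; omega)
      rw [if_pos rfl, ha]
      simp [prodKeys]
    · have hlt : idx < tokens.length - 1 := by omega
      have hidx : idx < tokens.length := h1
      have hdrop : tokens.drop idx = tokens[idx] :: tokens.drop (idx + 1) :=
        List.drop_eq_getElem_cons hidx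
      have htail : tokens.drop (idx + 1) ≠ [] := by
        have : (tokens.drop (idx + 1)).length = tokens.length - (idx + 1) := by simp
        intro hn; rw [hn] at this; simp at this; omega
      have hget : PySem.List.pyGetD tokens (idx : Int) "" = tokens[idx] := by
        rw [PySem.List.pyGetD_natCast]
        exact List.getD_eq_getElem _ _ hidx
      rw [if_neg h, hget]
      rw [ih tokens (idx + 1) (p ++ tokens[idx]) d (by omega) (by omega)]
      rw [ih tokens (idx + 1) (p ++ "-") _ (by omega) (by omega)]
      rw [hdrop, List.dropLast_cons_of_ne_nil htail]
      rw [prodKeys, List.foldl_append]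

-- B's layered product builds exactly prodKeys
lemma layered_eq (ts : List String) :
    ∀ acc : List String,
      ts.foldl (fun acc tok => acc.flatMap (fun p => [p ++ tok, p ++ "-"])) acc
        = acc.flatMap (fun p => prodKeys ts p) := by
  induction ts with
  | nil => intro acc; simp [prodKeys]
  | cons t ts ih =>
    intro acc
    rw [List.foldl_cons, ih, List.flatMap_assoc]
    congr 1
    funext p
    simp [prodKeys]

-- the two per-info-string steps coincide
lemma step_eq (scoresMap : PySem.Dict String (List String)) (tmp : String) :
    (let tokens := (PySem.Str.split? tmp " ").getD []
     forEachKeyA tokens.length 0 "" tokens ((PySem.List.pyGet? tokens (-1)).getD "") scoresMap)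
    = (let tokens := (PySem.Str.split? tmp " ").getD []
       let score := (PySem.List.pyGet? tokens (-1)).getD ""
       let keys := tokens.dropLast.foldl
         (fun acc tok => acc.flatMap (fun p => [p ++ tok, p ++ "-"])) [""]
       keys.foldl (fun m key => (m.setdefault key []).modify key [] (fun v => v ++ [score]))
         scoresMap) := by
  dsimp only
  set tokens := (PySem.Str.split? tmp " ").getD [] with htok
  have hne : tokens ≠ [] := tokens_ne_nil tmp
  have hpos : 0 < tokens.length := List.length_pos_iff.mpr hne
  set score := (PySem.List.pyGet? tokens (-1)).getD "" with hsc
  rw [forEachKeyA_eq score tokens.length tokens 0 "" scoresMap hpos (by omega)]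
  rw [layered_eq]
  simp only [List.drop_zero, List.flatMap_cons, List.flatMap_nil, List.append_nil]
  congr 1
  funext m k
  exact (addB_eq_addA m k score).symm

-- ===== VERDICT (by name: the statement is the Claim_ definition above) =====
theorem makeScoresMap_spec : Claim_equal_makeScoresMap := by
  intro info _
  unfold Spec_makeScoresMap makeScoresMap makeScoresMap_alt
  have : (fun (scoresMap : PySem.Dict String (List String)) (tmp : String) =>
      let tokens := (PySem.Str.split? tmp " ").getD []
      forEachKeyA tokens.length 0 "" tokens ((PySem.List.pyGet? tokens (-1)).getD "") scoresMap)
    = (fun (scoresMap : PySem.Dict String (List String)) (tmp : String) =>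
      let tokens := (PySem.Str.split? tmp " ").getD []
      let score := (PySem.List.pyGet? tokens (-1)).getD ""
      let keys := tokens.dropLast.foldl
        (fun acc tok => acc.flatMap (fun p => [p ++ tok, p ++ "-"])) [""]
      keys.foldl (fun m key => (m.setdefault key []).modify key [] (fun v => v ++ [score]))
        scoresMap) := by
    funext scoresMap tmp
    exact step_eq scoresMap tmp
  rw [this]
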